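-- pv_equiv track=rewrite | github.com/snap-research/duet-gen | utils/utils.py | find_indices_partial
-- ===== SOURCE A (Python) =====
-- def find_indices_partial(lookup_table, pairs):
--     indices = []
--     for pair in pairs:
--         if pair in lookup_table:
--             # Exact match
--             indices.append(lookup_table.index(pair))
--         else:
--             # Partial match: find closest pair with at least one matching element
--             closest_idx = -1  # Default for no match
--             for idx, lookup_pair in enumerate(lookup_table):
--                 if pair[0] == lookup_pair[0] or pair[1] == lookup_pair[1]:
--                     closest_idx = idx
--                     break  # Stop at the first partial match
--             indices.append(closest_idx)
--     return indices
-- ===== SOURCE B (Python) =====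
-- def find_indices_partial(lookup_table, pairs):
--     # One pass over the table builds three first-occurrence maps; each query is O(1).
--     exact, first0, first1 = {}, {}, {}
--     for idx, (x, y) in enumerate(lookup_table):
--         exact.setdefault((x, y), idx)
--         first0.setdefault(x, idx)
--         first1.setdefault(y, idx)
--
--     def query(p):
--         e = exact.get(p)
--         if e is not None:
--             return e
--         i = first0.get(p[0], -1)
--         j = first1.get(p[1], -1)
--         if i == -1:
--             return j
--         if j == -1:
--             return i
--         return min(i, j)
--
--     return [query(p) for p in pairs]
-- ===== Notes on version B (the rewrite author's own statement) =====
-- stated objective: faster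
-- what changed: Replaces the per-pair linear scans of the table (membership test, .index, and an inner enumerate loop) with three first-occurrence hash maps (exact pair, first column, second column) built in one pass; each pair is then answered by O(1) lookups combined with min.
import Mathlib
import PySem

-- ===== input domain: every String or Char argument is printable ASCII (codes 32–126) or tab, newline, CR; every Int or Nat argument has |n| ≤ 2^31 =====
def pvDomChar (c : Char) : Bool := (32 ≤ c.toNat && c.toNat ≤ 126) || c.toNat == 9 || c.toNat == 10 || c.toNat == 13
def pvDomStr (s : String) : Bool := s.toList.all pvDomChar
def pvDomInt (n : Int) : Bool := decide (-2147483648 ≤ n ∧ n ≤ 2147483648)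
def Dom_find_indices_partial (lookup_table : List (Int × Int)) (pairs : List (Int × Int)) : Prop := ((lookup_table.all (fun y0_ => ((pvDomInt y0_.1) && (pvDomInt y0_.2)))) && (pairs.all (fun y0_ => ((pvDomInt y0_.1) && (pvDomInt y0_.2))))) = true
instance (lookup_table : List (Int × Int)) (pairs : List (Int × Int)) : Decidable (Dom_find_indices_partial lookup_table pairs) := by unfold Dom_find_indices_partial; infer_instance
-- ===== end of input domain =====

-- B replaces A's per-pair linear scans of the table with three first-occurrence maps built
-- in one pass (exact pair, first column, second column), answering each pair by lookups + min; asymptotically faster.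


-- ===== PORT A =====
-- inner 'for idx, lookup_pair in enumerate(lookup_table): … break' loop (closest_idx stays -1 unless a match breaks)
def pvScanA (p : Int × Int) (i : Int) : List (Int × Int) → Int
  | [] => -1
  | q :: rest => if p.1 == q.1 || p.2 == q.2 then i else pvScanA p (i + 1) rest

def find_indices_partial (lookup_table : List (Int × Int)) (pairs : List (Int × Int)) : List Int :=
  pairs.foldl (fun indices pair =>
    if lookup_table.contains pair then
      -- lookup_table.index(pair); membership guard holds, so .getD 0 is never taken
      indices ++ [(((PySem.List.index? lookup_table pair).getD 0 : Nat) : Int)]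
    else
      indices ++ [pvScanA pair 0 lookup_table]) []

-- ===== PORT B =====
-- one pass over enumerate(lookup_table) building the three setdefault maps
def pvBuild (t : List (Int × Int)) :
    PySem.Dict (Int × Int) Int × PySem.Dict Int Int × PySem.Dict Int Int :=
  (PySem.List.enumerate t).foldl
    (fun m jp => (m.1.setdefault jp.2 jp.1, m.2.1.setdefault jp.2.1 jp.1, m.2.2.setdefault jp.2.2 jp.1))
    (PySem.Dict.empty, PySem.Dict.empty, PySem.Dict.empty)

def find_indices_partial_alt (lookup_table : List (Int × Int)) (pairs : List (Int × Int)) : List Int :=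
  let maps := pvBuild lookup_table
  pairs.map (fun p =>
    match maps.1.get? p with
    | some e => e
    | none =>
      let i := maps.2.1.getD p.1 (-1)
      let j := maps.2.2.getD p.2 (-1)
      if i = -1 then j else if j = -1 then i else min i j)

-- ===== PRECONDITION & SPEC =====
def Spec_find_indices_partial (lookup_table : List (Int × Int)) (pairs : List (Int × Int)) (out : List Int) : Prop := out = find_indices_partial_alt lookup_table pairs
instance (lookup_table : List (Int × Int)) (pairs : List (Int × Int)) (out : List Int) : Decidable (Spec_find_indices_partial lookup_table pairs out) := by unfold Spec_find_indices_partial; infer_instance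

-- ===== CLAIM (what is proved, stated in full; the proofs are below) =====
def Claim_equal_find_indices_partial : Prop := ∀ (lookup_table : List (Int × Int)) (pairs : List (Int × Int)), Dom_find_indices_partial lookup_table pairs → Spec_find_indices_partial lookup_table pairs (find_indices_partial lookup_table pairs)

-- ===== LEMMAS AND PROOFS =====

-- first index ≥ i at which (key q) equals k, in the suffix t
def pvFirst? {κ : Type} [BEq κ] (key : (Int × Int) → κ) (k : κ) : Int → List (Int × Int) → Option Int
  | _, [] => none
  | i, q :: rest => if key q == k then some i else pvFirst? key k (i + 1) rest

def pvCombine : Option Int → Option Int → Int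
  | none, none => -1
  | none, some j => j
  | some i, none => i
  | some i, some j => min i j

theorem pvFirst?_ge {κ : Type} [BEq κ] (key : (Int × Int) → κ) (k : κ)
    (t : List (Int × Int)) : ∀ (i j : Int), pvFirst? key k i t = some j → i ≤ j := by
  induction t with
  | nil => intro i j h; simp [pvFirst?] at h
  | cons q rest ih =>
    intro i j h
    simp only [pvFirst?] at h
    split at h
    · cases h; omega
    · have := ih (i + 1) j h; omega

theorem pvFoldTriple {α β γ δ : Type} (g1 : α → δ → α) (g2 : β → δ → β) (g3 : γ → δ → γ)
    (l : List δ) : ∀ (a : α) (b : β) (c : γ),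
    l.foldl (fun s x => (g1 s.1 x, g2 s.2.1 x, g3 s.2.2 x)) (a, b, c)
      = (l.foldl g1 a, l.foldl g2 b, l.foldl g3 c) := by
  induction l with
  | nil => intro a b c; rfl
  | cons x xs ih => intro a b c; simpa using ih (g1 a x) (g2 b x) (g3 c x)

theorem pvSdFoldGet {κ : Type} [BEq κ] [LawfulBEq κ] (key : (Int × Int) → κ) (k : κ)
    (t : List (Int × Int)) : ∀ (i : Int) (d : PySem.Dict κ Int),
    ((PySem.List.enumerate t i).foldl (fun d jp => d.setdefault (key jp.2) jp.1) d).get? k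
      = (d.get? k).or (pvFirst? key k i t) := by
  induction t with
  | nil => intro i d; simp [PySem.List.enumerate, pvFirst?]
  | cons q rest ih =>
    intro i d
    rw [PySem.List.enumerate_cons]
    simp only [List.foldl_cons]
    rw [ih (i + 1) (d.setdefault (key q) i)]
    by_cases hc : d.contains (key q) = true
    · rw [PySem.Dict.setdefault_of_contains _ _ hc]
      simp only [pvFirst?]
      by_cases hk : key q == k
      · have hk' : key q = k := by exact eq_of_beq hk
        subst hk'
        rcases PySem.Dict.contains_eq_isSome_get? (d := d) (k := key q) ▸ hc with h
        cases hg : d.get? (key q) with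
        | none => rw [hg] at h; simp at h
        | some v => simp [hk, hg]
      · simp [hk]
    · rw [PySem.Dict.setdefault_of_not_contains _ _ (by simpa using hc)]
      have hdg : d.get? (key q) = none := by
        rcases hg : d.get? (key q) with _ | v
        · rfl
        · exfalso; rw [PySem.Dict.contains_eq_isSome_get?, hg] at hc; simp at hc
      by_cases hk : key q == k
      · have hk' : key q = k := eq_of_beq hk
        subst hk'
        rw [PySem.Dict.get?_insert_self]
        simp [pvFirst?, hdg]
      · rw [PySem.Dict.get?_insert_of_ne _ _ (fun h => by simp [h] at hk)]
        simp [pvFirst?, hk]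

theorem pvBuild_eq (t : List (Int × Int)) :
    pvBuild t = ((PySem.List.enumerate t).foldl (fun d jp => d.setdefault jp.2 jp.1) PySem.Dict.empty,
                 (PySem.List.enumerate t).foldl (fun d jp => d.setdefault jp.2.1 jp.1) PySem.Dict.empty,
                 (PySem.List.enumerate t).foldl (fun d jp => d.setdefault jp.2.2 jp.1) PySem.Dict.empty) := by
  unfold pvBuild
  exact pvFoldTriple (fun d jp => d.setdefault jp.2 jp.1) (fun d jp => d.setdefault jp.2.1 jp.1)
    (fun d jp => d.setdefault jp.2.2 jp.1) (PySem.List.enumerate t)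
    PySem.Dict.empty PySem.Dict.empty PySem.Dict.empty

theorem pvBuild_exact (t : List (Int × Int)) (p : Int × Int) :
    (pvBuild t).1.get? p = pvFirst? (fun q => q) p 0 t := by
  rw [pvBuild_eq]
  rw [pvSdFoldGet (fun q => q) p t 0 PySem.Dict.empty]
  simp

theorem pvBuild_fst (t : List (Int × Int)) (x : Int) :
    (pvBuild t).2.1.get? x = pvFirst? (fun q => q.1) x 0 t := by
  rw [pvBuild_eq]
  rw [pvSdFoldGet (fun q => q.1) x t 0 PySem.Dict.empty]
  simp

theorem pvBuild_snd (t : List (Int × Int)) (y : Int) :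
    (pvBuild t).2.2.get? y = pvFirst? (fun q => q.2) y 0 t := by
  rw [pvBuild_eq]
  rw [pvSdFoldGet (fun q => q.2) y t 0 PySem.Dict.empty]
  simp

theorem pvFirst?_id_eq_index? (t : List (Int × Int)) (p : Int × Int) : ∀ (i : Int),
    pvFirst? (fun q => q) p i t = (PySem.List.index? t p).map (fun n => i + (n : Int)) := by
  induction t with
  | nil => intro i; simp [pvFirst?, PySem.List.index?_eq_idxOf?, List.idxOf?]
  | cons q rest ih =>
    intro i
    by_cases hk : q == p
    · have hq : q = p := eq_of_beq hk
      subst hq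
      rw [PySem.List.index?_cons_self]
      simp [pvFirst?]
    · have hne : q ≠ p := fun h => by simp [h] at hk
      rw [PySem.List.index?_cons_of_ne _ hne]
      simp only [pvFirst?, hk, Bool.false_eq_true, if_false, ih (i + 1), Option.map_map]
      cases PySem.List.index? rest p with
      | none => rfl
      | some n =>
        simp
        omega

theorem pvScanA_eq_combine (t : List (Int × Int)) (p : Int × Int) : ∀ (i : Int),
    pvScanA p i t = pvCombine (pvFirst? (fun q => q.1) p.1 i t) (pvFirst? (fun q => q.2) p.2 i t) := by
  induction t with
  | nil => intro i; simp [pvScanA, pvFirst?, pvCombine]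
  | cons q rest ih =>
    intro i
    simp only [pvScanA, pvFirst?]
    by_cases h1 : p.1 == q.1 <;> by_cases h2 : p.2 == q.2
    · have e1 : q.1 == p.1 := (beq_iff_eq ..).2 (eq_of_beq h1).symm
      have e2 : q.2 == p.2 := (beq_iff_eq ..).2 (eq_of_beq h2).symm
      simp [h1, e1, e2, pvCombine]
    · have e1 : q.1 == p.1 := (beq_iff_eq ..).2 (eq_of_beq h1).symm
      have e2 : ¬ (q.2 == p.2) := fun h => h2 ((beq_iff_eq ..).2 (eq_of_beq h).symm)
      simp only [h1, Bool.true_or, if_true, e1, if_true, e2, if_false]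
      rcases hs : pvFirst? (fun q => q.2) p.2 (i + 1) rest with _ | j
      · simp [pvCombine]
      · have := pvFirst?_ge (fun q => q.2) p.2 rest (i + 1) j hs
        simp [pvCombine]; omega
    · have e1 : ¬ (q.1 == p.1) := fun h => h1 ((beq_iff_eq ..).2 (eq_of_beq h).symm)
      have e2 : q.2 == p.2 := (beq_iff_eq ..).2 (eq_of_beq h2).symm
      simp only [h1, h2, Bool.false_or, if_true, e1, if_false, e2, if_true]
      rcases hs : pvFirst? (fun q => q.1) p.1 (i + 1) rest with _ | j
      · simp [pvCombine]
      · have := pvFirst?_ge (fun q => q.1) p.1 rest (i + 1) j hs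
        simp [pvCombine]; omega
    · have e1 : ¬ (q.1 == p.1) := fun h => h1 ((beq_iff_eq ..).2 (eq_of_beq h).symm)
      have e2 : ¬ (q.2 == p.2) := fun h => h2 ((beq_iff_eq ..).2 (eq_of_beq h).symm)
      simp only [h1, h2, Bool.false_or, if_false, e1, if_false, e2, if_false]
      exact ih (i + 1)

-- per-pair agreement of the two programs
theorem pvPerPair (t : List (Int × Int)) (p : Int × Int) :
    (if t.contains p then (((PySem.List.index? t p).getD 0 : Nat) : Int) else pvScanA p 0 t)
      = (match (pvBuild t).1.get? p with
         | some e => e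
         | none =>
           let i := (pvBuild t).2.1.getD p.1 (-1)
           let j := (pvBuild t).2.2.getD p.2 (-1)
           if i = -1 then j else if j = -1 then i else min i j) := by
  rw [pvBuild_exact, pvFirst?_id_eq_index?]
  by_cases hm : p ∈ t
  · have hc : t.contains p = true := by simpa using hm
    rcases hi : PySem.List.index? t p with _ | n
    · exact absurd hm ((PySem.List.index?_eq_none_iff t p).1 hi)
    · simp [hc]
      intro h
      exact absurd hm h
  · have hc : t.contains p = false := by simpa using hm
    have hi : PySem.List.index? t p = none := (PySem.List.index?_eq_none_iff t p).2 hm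
    rw [hi]
    simp only [hc, Bool.false_eq_true, if_false]
    change pvScanA p 0 t =
      (let i := (pvBuild t).2.1.getD p.1 (-1);
       let j := (pvBuild t).2.2.getD p.2 (-1);
       if i = -1 then j else if j = -1 then i else min i j)
    rw [pvScanA_eq_combine]
    simp only [PySem.Dict.getD_eq_get?_getD, pvBuild_fst, pvBuild_snd]
    rcases h0 : pvFirst? (fun q => q.1) p.1 0 t with _ | a <;>
      rcases h1 : pvFirst? (fun q => q.2) p.2 0 t with _ | b
    · simp [pvCombine]
    · have hb := pvFirst?_ge _ _ t 0 b h1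
      simp [pvCombine]
    · have ha := pvFirst?_ge _ _ t 0 a h0
      simp [pvCombine]
    · have ha := pvFirst?_ge _ _ t 0 a h0
      have hb := pvFirst?_ge _ _ t 0 b h1
      simp only [pvCombine, Option.getD_some]
      rw [if_neg (by omega), if_neg (by omega)]

-- ===== VERDICT (by name: the statement is the Claim_ definition above) =====
theorem find_indices_partial_spec : Claim_equal_find_indices_partial := by
  intro t pairs _
  unfold Spec_find_indices_partial find_indices_partial find_indices_partial_alt
  have hbody : ∀ (acc : List Int) (p : Int × Int),
      (if t.contains p then acc ++ [(((PySem.List.index? t p).getD 0 : Nat) : Int)]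
       else acc ++ [pvScanA p 0 t])
        = acc ++ [if t.contains p then (((PySem.List.index? t p).getD 0 : Nat) : Int) else pvScanA p 0 t] := by
    intro acc p; split <;> rfl
  simp only [hbody]
  rw [PySem.List.foldl_append_singleton_eq_map]
  simp only [List.nil_append]
  apply List.map_congr_left
  intro p _
  exact pvPerPair t p
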